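-- pv_equiv track=rewrite | github.com/azizamari/Algorthms-solutions | hackercup/round1/chap1p2.py | allSubStrings
-- ===== SOURCE A (Python) =====
-- def allSubStrings(Str):
--     n=len(Str)
--     total=0
--     for Len in range(1,n + 1):
--         for i in range(n - Len + 1):
--             j = i + Len - 1
--             r=''
--             for k in range(i,j + 1):
--                 r+=Str[k]
--             # do
--             count=len(generateNewString(r.replace('F','')))-1
--             if count<0:count=0
--             total+=count
--     return total
--
-- def generateNewString(s):
--     if len(s)<=0:return ''
--     n=s[0]
--     prev=s[0]
--     for i in s:
--         if i!=prev:
--             n+=i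
--             prev=i
--     return n
-- ===== SOURCE B (Python) =====
-- def allSubStrings(Str):
--     n = len(Str)
--     total = 0
--     for i in range(n):
--         last = ''
--         cnt = 0
--         for j in range(i, n):
--             c = Str[j]
--             if c != 'F':
--                 if last != '' and last != c:
--                     cnt += 1
--                 last = c
--             total += cnt
--     return total
-- ===== Notes on version B (the rewrite author's own statement) =====
-- stated objective: faster
-- what changed: Instead of materializing every substring, stripping the letter F and collapsing runs (A's triple loop), B makes one pass per start index, maintaining the last character other than the letter F and an incrementally updated boundary count that is added to the total at each end index.
import Mathlib
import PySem

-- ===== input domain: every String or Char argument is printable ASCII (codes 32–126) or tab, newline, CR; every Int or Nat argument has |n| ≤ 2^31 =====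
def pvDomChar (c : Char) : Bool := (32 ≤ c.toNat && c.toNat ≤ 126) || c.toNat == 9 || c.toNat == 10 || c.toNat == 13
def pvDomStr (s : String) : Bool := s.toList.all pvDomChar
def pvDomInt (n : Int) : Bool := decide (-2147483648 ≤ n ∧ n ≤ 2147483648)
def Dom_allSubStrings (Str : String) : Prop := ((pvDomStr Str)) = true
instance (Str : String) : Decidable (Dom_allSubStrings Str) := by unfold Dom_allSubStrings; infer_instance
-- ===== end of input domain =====

-- B replaces A's rebuild/collapse/count of every substring by one incremental pass per start index
-- (maintaining the last character other than the letter F and a running boundary count): a different, faster algorithm.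

-- ===== PORT A =====
-- Python helper generateNewString, on the string's character list
def generateNewString (s : List Char) : List Char :=
  if s.length ≤ 0 then [] else
  -- s[0]: in range, since this branch guarantees s ≠ []
  let c0 := (PySem.List.pyGet? s (0 : Int)).getD ' '
  (s.foldl (fun (st : List Char × Char) i =>
    if i ≠ st.2 then (st.1 ++ [i], i) else st) ([c0], c0)).1

def allSubStrings (Str : String) : Int :=
  let l := Str.toList
  let n : Int := (l.length : Int)
  (PySem.List.pyRange 1 (n + 1)).foldl (fun total Len =>
    (PySem.List.pyRange 0 (n - Len + 1)).foldl (fun total i =>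
      let j := i + Len - 1
      -- r += Str[k]: k is always in range here
      let r := (PySem.List.pyRange i (j + 1)).foldl (fun r k =>
        r ++ [(PySem.List.pyGet? l k).getD ' ']) ([] : List Char)
      let count : Int := ((generateNewString (PySem.Chars.replace r ['F'] [])).length : Int) - 1
      let count := if count < 0 then 0 else count
      total + count) total) (0 : Int)

-- ===== PORT B =====
def allSubStrings_alt (Str : String) : Int :=
  let l := Str.toList
  let n : Int := (l.length : Int)
  (PySem.List.pyRange 0 n).foldl (fun total i =>
    ((PySem.List.pyRange i n).foldl (fun (st : Int × List Char × Int) j =>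
      -- c = Str[j]: j is always in range here; state st = (total, last, cnt)
      let c := (PySem.List.pyGet? l j).getD ' '
      if c ≠ 'F' then
        let cnt := if st.2.1 ≠ [] ∧ st.2.1 ≠ [c] then st.2.2 + 1 else st.2.2
        (st.1 + cnt, [c], cnt)
      else (st.1 + st.2.2, st.2.1, st.2.2)) (total, ([] : List Char), (0 : Int))).1) (0 : Int)

-- ===== PRECONDITION & SPEC =====
def Spec_allSubStrings (Str : String) (out : Int) : Prop := out = allSubStrings_alt Str
instance (Str : String) (out : Int) : Decidable (Spec_allSubStrings Str out) := by unfold Spec_allSubStrings; infer_instance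

-- ===== CLAIM (what is proved, stated in full; the proofs are below) =====
def Claim_equal_allSubStrings : Prop := ∀ (Str : String), Dom_allSubStrings Str → Spec_allSubStrings Str (allSubStrings Str)

-- ===== LEMMAS AND PROOFS =====

-- number of changes while scanning a list, the previous character being p
def chg (p : Char) : List Char → Nat
  | [] => 0
  | x :: t => (if x ≠ p then 1 else 0) + chg x t

-- number of adjacent differing pairs
def pc : List Char → Nat
  | [] => 0
  | x :: t => chg x t

-- the non-'F' characters
def nfF (l : List Char) : List Char := l.filter (fun c => c ≠ 'F')

-- the substring Str[i : i+L]
def seg (l : List Char) (i L : Nat) : List Char := (l.drop i).take L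

-- B's "last" variable: the last non-'F' character seen so far, as '' or a one-character string
def lastOf (u : List Char) : List Char :=
  match (nfF u).getLast? with
  | none => []
  | some c => [c]

lemma pyRange_one_map (a b : Int) :
    PySem.List.pyRange a b = (List.range (b - a).toNat).map (fun m : ℕ => a + (m : Int)) := by
  unfold PySem.List.pyRange
  simp only [one_ne_zero, if_false, zero_lt_one, if_true, mul_comm]
  split_ifs with h
  · simp
  · have : (b - a).toNat = 0 := by omega
    simp [this]

lemma list_sum_range_eq (n : ℕ) (f : ℕ → ℤ) :
    ((List.range n).map f).sum = ∑ i ∈ Finset.range n, f i := rfl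

-- exchanging the two summations over the triangle {(a,b) | a + b < n}
theorem tri_swap (n : ℕ) (g : ℕ → ℕ → ℤ) :
    ∑ a ∈ Finset.range n, ∑ b ∈ Finset.range (n - a), g a b
      = ∑ b ∈ Finset.range n, ∑ a ∈ Finset.range (n - b), g a b := by
  have h : ∀ h : ℕ → ℕ → ℤ, ∑ a ∈ Finset.range n, ∑ b ∈ Finset.range (n - a), h a b
      = ∑ p ∈ (Finset.range n ×ˢ Finset.range n).filter (fun p => p.1 + p.2 < n), h p.1 p.2 := by
    intro h
    rw [Finset.sum_filter, Finset.sum_product]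
    refine Finset.sum_congr rfl fun a _ => ?_
    have : Finset.range (n - a) = (Finset.range n).filter (fun b => a + b < n) := by
      ext b; simp only [Finset.mem_filter, Finset.mem_range]; omega
    rw [this, Finset.sum_filter]
  rw [h g, h (fun b a => g a b)]
  exact Finset.sum_nbij' (fun p => (p.2, p.1)) (fun p => (p.2, p.1))
    (by intro p hp; simp only [Finset.mem_filter, Finset.mem_product, Finset.mem_range] at *; omega)
    (by intro p hp; simp only [Finset.mem_filter, Finset.mem_product, Finset.mem_range] at *; omega)
    (by intro p _; rfl) (by intro p _; rfl) (by intro p _; rfl)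

-- str.replace('F', '') removes exactly the 'F's
lemma replace_go_F (fuel : ℕ) : ∀ (l acc : List Char), l.length ≤ fuel →
    PySem.Chars.replace.go ['F'] [] fuel l acc = acc.reverse ++ l.filter (fun c => c ≠ 'F') := by
  induction fuel with
  | zero =>
    intro l acc h
    have : l = [] := by cases l <;> simp_all
    subst this
    simp [PySem.Chars.replace.go]
  | succ m ih =>
    intro l acc h
    cases l with
    | nil => simp [PySem.Chars.replace.go]
    | cons c t =>
      rw [PySem.Chars.replace.go]
      by_cases hc : c = 'F'
      · subst hc
        have hp : List.isPrefixOf ['F'] ('F' :: t) = true := by simp [List.isPrefixOf]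
        rw [if_pos hp]
        simp only [List.length_cons] at h
        rw [ih _ _ (by simpa using Nat.le_of_succ_le_succ h)]
        simp
      · have hp : List.isPrefixOf ['F'] (c :: t) = false := by
          simp only [List.isPrefixOf, Bool.and_eq_false_iff, beq_eq_false_iff_ne, ne_eq]
          left
          exact fun hh => hc hh.symm
        rw [if_neg (by simp [hp])]
        simp only [List.length_cons] at h
        rw [ih _ _ (Nat.le_of_succ_le_succ h)]
        simp [hc]

lemma replace_F (l : List Char) : PySem.Chars.replace l ['F'] [] = nfF l := by
  rw [PySem.Chars.replace]
  rw [if_neg (by simp)]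
  rw [replace_go_F l.length l [] le_rfl]
  simp [nfF]

-- generateNewString's loop: collapsed length = start length + number of changes
lemma gNS_fold (s : List Char) : ∀ (acc : List Char) (prev : Char),
    ((s.foldl (fun (st : List Char × Char) i =>
      if i ≠ st.2 then (st.1 ++ [i], i) else st) (acc, prev)).1).length = acc.length + chg prev s := by
  induction s with
  | nil => intro acc prev; simp [chg]
  | cons x t ih =>
    intro acc prev
    rw [List.foldl_cons]
    dsimp only
    by_cases h : x = prev
    · rw [if_neg (by simp [h])]
      rw [ih]; simp [chg, h]
    · rw [if_pos (by simp [h])]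
      rw [ih]; simp [chg, h]; omega

lemma gNS_len (v : List Char) : (generateNewString v).length = if v = [] then 0 else 1 + pc v := by
  cases v with
  | nil => simp [generateNewString]
  | cons x t =>
    rw [generateNewString]
    rw [if_neg (by simp)]
    have hc0 : (PySem.List.pyGet? (x :: t) (0 : Int)).getD ' ' = x := by
      simp [PySem.List.pyGet?, PySem.List.pyIdx?]
    rw [hc0, gNS_fold]
    simp [pc, chg]

-- A's clamped per-substring count equals the boundary count of the 'F'-free substring
lemma countVal (r : List Char) :
    (if ((generateNewString (PySem.Chars.replace r ['F'] [])).length : Int) - 1 < 0 then (0 : Int)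
     else ((generateNewString (PySem.Chars.replace r ['F'] [])).length : Int) - 1) = (pc (nfF r) : Int) := by
  rw [replace_F]
  cases hv : nfF r with
  | nil => simp [gNS_len, pc]
  | cons x t =>
    simp only [gNS_len, List.cons_ne_nil, if_false]
    rw [if_neg (by push_cast; omega)]
    push_cast
    ring

lemma chg_append_singleton (v : List Char) : ∀ (p c : Char),
    chg p (v ++ [c]) = chg p v + (if v.getLastD p ≠ c then 1 else 0) := by
  induction v with
  | nil =>
    intro p c
    simp only [List.nil_append, chg, List.getLastD_nil, ne_eq, add_zero, zero_add]
    rcases eq_or_ne c p with h | h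
    · simp [h]
    · simp [h, h.symm]
  | cons x w ih => intro p c; simp only [List.cons_append, chg, ih x c, List.getLastD_cons]; omega

lemma pc_append_singleton (v : List Char) (c : Char) :
    pc (v ++ [c]) = pc v + (if v ≠ [] ∧ v.getLast? ≠ some c then 1 else 0) := by
  cases v with
  | nil => simp [pc, chg]
  | cons x w =>
    simp only [List.cons_append, pc, chg_append_singleton, List.getLast?_cons, ne_eq,
      List.cons_ne_nil, not_false_iff, true_and, Option.some_inj]
    simp [List.getLastD_eq_getLast?]

lemma nfF_append_singleton (u : List Char) (c : Char) :
    nfF (u ++ [c]) = nfF u ++ (if c ≠ 'F' then [c] else []) := by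
  simp only [nfF, List.filter_append]
  congr 1
  split_ifs with h <;> simp [h]

lemma lastOf_append_singleton (u : List Char) (c : Char) :
    lastOf (u ++ [c]) = if c ≠ 'F' then [c] else lastOf u := by
  unfold lastOf
  rw [nfF_append_singleton]
  by_cases h : c = 'F'
  · simp [h]
  · simp [h]

-- one step of B's inner loop
lemma step_lemma (u : List Char) (c : Char) (tot : Int) :
    (if c ≠ 'F' then
        let cnt := if lastOf u ≠ [] ∧ lastOf u ≠ [c] then (pc (nfF u) : Int) + 1 else (pc (nfF u) : Int)
        (tot + cnt, [c], cnt)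
      else (tot + (pc (nfF u) : Int), lastOf u, (pc (nfF u) : Int)))
    = (tot + (pc (nfF (u ++ [c])) : Int), lastOf (u ++ [c]), (pc (nfF (u ++ [c])) : Int)) := by
  by_cases hF : c = 'F'
  · subst hF; simp [nfF_append_singleton, lastOf_append_singleton]
  · simp only [ne_eq, hF, not_false_iff, if_true, nfF_append_singleton, lastOf_append_singleton,
      pc_append_singleton]
    have hcond : ((¬ lastOf u = []) ∧ ¬ lastOf u = [c]) ↔ ((¬ nfF u = []) ∧ ¬ (nfF u).getLast? = some c) := by
      unfold lastOf
      rcases hg : (nfF u).getLast? with _ | d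
      · simp [List.getLast?_eq_none_iff.mp hg]
      · have hne : nfF u ≠ [] := by intro hn; rw [hn] at hg; simp at hg
        simp [hne]
    split_ifs with ha hb hb
    · push_cast; simp
    · exact absurd (hcond.mp ha) hb
    · exact absurd (hcond.mpr hb) ha
    · simp

-- a fold over an index range of lookups is a fold over the list itself
lemma foldl_range_getD {β : Type} (t : List Char) (f : β → Char → β) : ∀ (b : β),
    (List.range t.length).foldl (fun acc k => f acc (t.getD k ' ')) b = t.foldl f b := by
  induction t with
  | nil => intro b; simp
  | cons c t ih =>
    intro b
    rw [List.length_cons, List.range_succ_eq_map, List.foldl_cons, List.foldl_map]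
    simp only [List.getD_cons_zero, List.getD_cons_succ]
    exact ih (f b c)

-- B's inner loop, with a generalized already-processed prefix u
lemma B_inner (t : List Char) : ∀ (u : List Char) (tot : Int),
    t.foldl (fun (st : Int × List Char × Int) c =>
      if c ≠ 'F' then
        let cnt := if st.2.1 ≠ [] ∧ st.2.1 ≠ [c] then st.2.2 + 1 else st.2.2
        (st.1 + cnt, [c], cnt)
      else (st.1 + st.2.2, st.2.1, st.2.2)) (tot, lastOf u, (pc (nfF u) : Int))
    = (tot + ∑ p ∈ Finset.range t.length, (pc (nfF (u ++ t.take (p + 1))) : Int),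
       lastOf (u ++ t), ((pc (nfF (u ++ t)) : Int))) := by
  induction t with
  | nil => intro u tot; simp
  | cons c t ih =>
    intro u tot
    rw [List.foldl_cons]
    have hstep := step_lemma u c tot
    dsimp only at hstep ⊢
    rw [hstep]
    rw [ih (u ++ [c]) (tot + (pc (nfF (u ++ [c])) : Int))]
    rw [List.length_cons, Finset.sum_range_succ' (fun p => (pc (nfF (u ++ (c :: t).take (p + 1))) : Int))]
    simp only [List.take_succ_cons, List.take_zero]
    simp only [Prod.mk.injEq, ← List.append_cons]
    ring_nf
    simp

lemma B_inner_fold (l : List Char) (k : ℕ) (hk : k < l.length) (total : Int) :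
    ((PySem.List.pyRange ((k : ℕ) : Int) ((l.length : ℕ) : Int)).foldl (fun (st : Int × List Char × Int) j =>
      let c := (PySem.List.pyGet? l j).getD ' '
      if c ≠ 'F' then
        let cnt := if st.2.1 ≠ [] ∧ st.2.1 ≠ [c] then st.2.2 + 1 else st.2.2
        (st.1 + cnt, [c], cnt)
      else (st.1 + st.2.2, st.2.1, st.2.2)) (total, ([] : List Char), (0 : Int))).1
    = total + ∑ p ∈ Finset.range (l.length - k), (pc (nfF (seg l k (p + 1))) : Int) := by
  rw [pyRange_one_map, List.foldl_map]
  have hlen : (((l.length : ℕ) : Int) - ((k : ℕ) : Int)).toNat = (l.drop k).length := by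
    simp
  rw [hlen]
  have hcongr : ∀ (st : Int × List Char × Int), ∀ m ∈ List.range (l.drop k).length,
      (fun (st : Int × List Char × Int) (m : ℕ) =>
        let c := (PySem.List.pyGet? l ((k : Int) + (m : Int))).getD ' '
        if c ≠ 'F' then
          let cnt := if st.2.1 ≠ [] ∧ st.2.1 ≠ [c] then st.2.2 + 1 else st.2.2
          (st.1 + cnt, [c], cnt)
        else (st.1 + st.2.2, st.2.1, st.2.2)) st m
      = (fun (st : Int × List Char × Int) (m : ℕ) =>
        let c := (l.drop k).getD m ' '
        if c ≠ 'F' then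
          let cnt := if st.2.1 ≠ [] ∧ st.2.1 ≠ [c] then st.2.2 + 1 else st.2.2
          (st.1 + cnt, [c], cnt)
        else (st.1 + st.2.2, st.2.1, st.2.2)) st m := by
    intro st m hm
    simp only [List.mem_range, List.length_drop] at hm
    have h1 : ((k : Int) + (m : Int)) = (((k + m : ℕ) : Int)) := by push_cast; ring
    have h2 : (PySem.List.pyGet? l ((k : Int) + (m : Int))).getD ' ' = (l.drop k).getD m ' ' := by
      rw [h1]
      show PySem.List.pyGetD l (((k + m : ℕ) : Int)) ' '  = _
      rw [PySem.List.pyGetD_natCast]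
      rw [List.getD_eq_getElem _ _ (by omega), List.getD_eq_getElem _ _ (by simp; omega)]
      simp [List.getElem_drop]
    dsimp only
    rw [h2]
  rw [PySem.List.foldl_congr_mem _ _ _ _ hcongr]
  have hfr := foldl_range_getD (l.drop k) (fun (st : Int × List Char × Int) c =>
      if c ≠ 'F' then
        let cnt := if st.2.1 ≠ [] ∧ st.2.1 ≠ [c] then st.2.2 + 1 else st.2.2
        (st.1 + cnt, [c], cnt)
      else (st.1 + st.2.2, st.2.1, st.2.2)) ((total, ([] : List Char), (0 : Int)))
  rw [show (fun (st : Int × List Char × Int) (m : ℕ) =>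
        let c := (l.drop k).getD m ' '
        if c ≠ 'F' then
          let cnt := if st.2.1 ≠ [] ∧ st.2.1 ≠ [c] then st.2.2 + 1 else st.2.2
          (st.1 + cnt, [c], cnt)
        else (st.1 + st.2.2, st.2.1, st.2.2))
      = (fun (acc : Int × List Char × Int) (m : ℕ) =>
          (fun (st : Int × List Char × Int) c =>
            if c ≠ 'F' then
              let cnt := if st.2.1 ≠ [] ∧ st.2.1 ≠ [c] then st.2.2 + 1 else st.2.2
              (st.1 + cnt, [c], cnt)
            else (st.1 + st.2.2, st.2.1, st.2.2)) acc ((l.drop k).getD m ' ')) from rfl]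
  rw [hfr]
  have h0 : ((total, ([] : List Char), (0 : Int)) : Int × List Char × Int)
      = (total, lastOf [], ((pc (nfF [])) : Int)) := rfl
  rw [h0, B_inner]
  simp [seg]

lemma B_sum (Str : String) :
    allSubStrings_alt Str = ∑ i ∈ Finset.range Str.toList.length,
      ∑ k ∈ Finset.range (Str.toList.length - i), (pc (nfF (seg Str.toList i (k + 1))) : Int) := by
  unfold allSubStrings_alt
  dsimp only
  rw [pyRange_one_map, List.foldl_map]
  have hlen : (((Str.toList.length : ℕ) : Int) - 0).toNat = Str.toList.length := by simp
  rw [hlen]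
  have hcongr : ∀ (total : Int), ∀ k ∈ List.range Str.toList.length,
      (fun (total : Int) (k : ℕ) =>
        ((PySem.List.pyRange ((0 : Int) + (k : Int)) ((Str.toList.length : ℕ) : Int)).foldl (fun (st : Int × List Char × Int) j =>
          let c := (PySem.List.pyGet? Str.toList j).getD ' '
          if c ≠ 'F' then
            let cnt := if st.2.1 ≠ [] ∧ st.2.1 ≠ [c] then st.2.2 + 1 else st.2.2
            (st.1 + cnt, [c], cnt)
          else (st.1 + st.2.2, st.2.1, st.2.2)) (total, ([] : List Char), (0 : Int))).1) total k
      = total + ∑ p ∈ Finset.range (Str.toList.length - k), (pc (nfF (seg Str.toList k (p + 1))) : Int) := by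
    intro total k hk
    simp only [List.mem_range] at hk
    have : ((0 : Int) + (k : Int)) = ((k : ℕ) : Int) := by ring
    dsimp only
    rw [this]
    exact B_inner_fold Str.toList k hk total
  rw [PySem.List.foldl_congr_mem _ _ _ _ hcongr]
  rw [PySem.List.foldl_add]
  rw [list_sum_range_eq]
  simp

lemma r_eq_seg (l : List Char) (i L : ℕ) (h : i + L ≤ l.length) :
    (List.range L).map (fun m : ℕ => (PySem.List.pyGet? l ((i : Int) + (m : Int))).getD ' ') = seg l i L := by
  apply List.ext_getElem
  · simp [seg]; omega
  · intro m h1 h2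
    simp only [List.getElem_map, List.getElem_range]
    have hm : m < L := by simpa using h1
    have hc : ((i : Int) + (m : Int)) = (((i + m : ℕ)) : Int) := by push_cast; ring
    rw [hc]
    show PySem.List.pyGetD l (((i + m : ℕ)) : Int) ' ' = _
    rw [PySem.List.pyGetD_natCast]
    rw [List.getD_eq_getElem _ _ (by omega)]
    simp [seg]

lemma r_fold_eq_seg (l : List Char) (i L : ℕ) (h : i + L ≤ l.length) :
    (PySem.List.pyRange ((i : ℕ) : Int) (((i : ℕ) : Int) + ((L : ℕ) : Int))).foldl
      (fun r k => r ++ [(PySem.List.pyGet? l k).getD ' ']) ([] : List Char) = seg l i L := by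
  rw [pyRange_one_map, List.foldl_map]
  have hL : (((i : ℕ) : Int) + ((L : ℕ) : Int) - ((i : ℕ) : Int)).toNat = L := by simp
  rw [hL]
  rw [PySem.List.foldl_append_singleton_eq_map]
  rw [List.nil_append]
  exact r_eq_seg l i L h

lemma A_inner_fold (l : List Char) (k : ℕ) (hk : k < l.length) (total : Int) :
    (PySem.List.pyRange 0 (((l.length : ℕ) : Int) - (1 + (k : Int)) + 1)).foldl (fun total i =>
      let j := i + (1 + (k : Int)) - 1
      let r := (PySem.List.pyRange i (j + 1)).foldl (fun r m =>
        r ++ [(PySem.List.pyGet? l m).getD ' ']) ([] : List Char)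
      let count : Int := ((generateNewString (PySem.Chars.replace r ['F'] [])).length : Int) - 1
      let count := if count < 0 then 0 else count
      total + count) total
    = total + ∑ i ∈ Finset.range (l.length - k), (pc (nfF (seg l i (k + 1))) : Int) := by
  rw [pyRange_one_map, List.foldl_map]
  have hlen : ((((l.length : ℕ) : Int) - (1 + (k : Int)) + 1) - 0).toNat = l.length - k := by omega
  rw [hlen]
  have hcongr : ∀ (total : Int), ∀ i ∈ List.range (l.length - k),
      (fun (total : Int) (i : ℕ) =>
        let j := ((0 : Int) + (i : Int)) + (1 + (k : Int)) - 1
        let r := (PySem.List.pyRange ((0 : Int) + (i : Int)) (j + 1)).foldl (fun r m =>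
          r ++ [(PySem.List.pyGet? l m).getD ' ']) ([] : List Char)
        let count : Int := ((generateNewString (PySem.Chars.replace r ['F'] [])).length : Int) - 1
        let count := if count < 0 then 0 else count
        total + count) total i
      = total + (pc (nfF (seg l i (k + 1))) : Int) := by
    intro total i hi
    simp only [List.mem_range] at hi
    dsimp only
    have h1 : ((0 : Int) + (i : Int)) + (1 + (k : Int)) - 1 + 1 = ((i : ℕ) : Int) + (((k + 1 : ℕ)) : Int) := by
      push_cast; ring
    have h2 : ((0 : Int) + (i : Int)) = ((i : ℕ) : Int) := by ring
    rw [h1, h2, r_fold_eq_seg l i (k + 1) (by omega)]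
    rw [countVal (seg l i (k + 1))]
  rw [PySem.List.foldl_congr_mem _ _ _ _ hcongr]
  rw [PySem.List.foldl_add]
  rw [list_sum_range_eq]

lemma A_sum (Str : String) :
    allSubStrings Str = ∑ k ∈ Finset.range Str.toList.length,
      ∑ i ∈ Finset.range (Str.toList.length - k), (pc (nfF (seg Str.toList i (k + 1))) : Int) := by
  unfold allSubStrings
  dsimp only
  rw [pyRange_one_map, List.foldl_map]
  have hlen : ((((Str.toList.length : ℕ) : Int) + 1) - 1).toNat = Str.toList.length := by omega
  rw [hlen]
  have hcongr : ∀ (total : Int), ∀ k ∈ List.range Str.toList.length,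
      (fun (total : Int) (k : ℕ) =>
        (PySem.List.pyRange 0 (((Str.toList.length : ℕ) : Int) - ((1 : Int) + (k : Int)) + 1)).foldl (fun total i =>
          let j := i + ((1 : Int) + (k : Int)) - 1
          let r := (PySem.List.pyRange i (j + 1)).foldl (fun r m =>
            r ++ [(PySem.List.pyGet? Str.toList m).getD ' ']) ([] : List Char)
          let count : Int := ((generateNewString (PySem.Chars.replace r ['F'] [])).length : Int) - 1
          let count := if count < 0 then 0 else count
          total + count) total) total k
      = total + ∑ i ∈ Finset.range (Str.toList.length - k), (pc (nfF (seg Str.toList i (k + 1))) : Int) := by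
    intro total k hk
    simp only [List.mem_range] at hk
    dsimp only
    exact A_inner_fold Str.toList k hk total
  rw [PySem.List.foldl_congr_mem _ _ _ _ hcongr]
  rw [PySem.List.foldl_add]
  rw [list_sum_range_eq]
  rw [zero_add]

-- ===== VERDICT (by name: the statement is the Claim_ definition above) =====
theorem allSubStrings_spec : Claim_equal_allSubStrings := by
  intro Str _
  unfold Spec_allSubStrings
  rw [A_sum, B_sum]
  exact tri_swap _ _
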